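-- pv_equiv track=rewrite | github.com/sheamus-hei/whiteboarding | misc/match_phone_codes.py | match3
-- ===== SOURCE A (Python) =====
-- def match3(prefixes, nums):
--   matching = []
--   for num in nums:
--     appended = False
--     for prefix in prefixes:
--       if num.startswith(prefix):
--         if appended == False:
--           appended = True
--           matching.append(prefix)
--         elif len(matching[-1]) < len(prefix):
--           matching[-1] = prefix
--     if appended == False:
--       matching.append("")
--   return matching
-- ===== SOURCE B (Python) =====
-- def match3(prefixes, nums):
--     # For each num, return its longest prefix that occurs in `prefixes` ("" if none):
--     # instead of scanning all prefixes per num, probe num's own prefixes longest-first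
--     # against a hash set built once.
--     pset = set(prefixes)
--     def best(num):
--         for k in range(len(num), 0, -1):
--             cand = num[:k]
--             if cand in pset:
--                 return cand
--         return ""
--     return [best(num) for num in nums]
-- ===== Notes on version B (the rewrite author's own statement) =====
-- stated objective: faster
-- what changed: B builds a hash set of the prefixes once and, for each num, probes num's own prefixes longest-first for set membership, instead of A's per-num scan over the whole prefix list maintaining an appended flag and rewriting the list's last element.
import Mathlib
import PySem

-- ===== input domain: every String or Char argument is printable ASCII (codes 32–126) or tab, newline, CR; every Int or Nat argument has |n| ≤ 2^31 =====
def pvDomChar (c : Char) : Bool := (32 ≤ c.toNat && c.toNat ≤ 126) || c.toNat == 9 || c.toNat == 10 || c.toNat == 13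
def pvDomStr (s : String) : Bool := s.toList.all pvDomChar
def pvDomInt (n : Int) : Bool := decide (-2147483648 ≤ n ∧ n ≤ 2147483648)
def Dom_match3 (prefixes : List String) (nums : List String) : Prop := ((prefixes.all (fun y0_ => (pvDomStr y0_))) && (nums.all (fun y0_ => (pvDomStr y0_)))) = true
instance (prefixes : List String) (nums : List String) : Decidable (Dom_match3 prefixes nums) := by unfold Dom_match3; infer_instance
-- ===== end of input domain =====

-- B replaces A's per-num scan over all prefixes by longest-first probes of num's own
-- prefixes against a set of the prefixes built once (objective: faster).

-- ===== PORT A =====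
-- inner loop body over one prefix; state = (appended, matching).
-- matching[-1] is read with pyGet? (-1) (list is nonempty whenever appended = true,
-- so the .getD "" default is never used); 'matching[-1] = prefix' is dropLast ++ [prefix],
-- exact on a nonempty list.
def match3InnerStep (num : String) (st : Bool × List String) (pfx : String) : Bool × List String :=
  if PySem.Str.startswith num pfx then
    if st.1 = false then (true, st.2 ++ [pfx])
    else if PySem.Str.len ((PySem.List.pyGet? st.2 (-1)).getD "") < PySem.Str.len pfx then
      (st.1, st.2.dropLast ++ [pfx])
    else st
  else st

def match3 (prefixes : List String) (nums : List String) : List String :=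
  nums.foldl
    (fun matching num =>
      let st := prefixes.foldl (match3InnerStep num) (false, matching)
      if st.1 = false then st.2 ++ [""] else st.2)
    []

-- ===== PORT B =====
-- 'for k in range(len(num), 0, -1): if num[:k] in pset: return num[:k]' / 'return ""'
def match3Best (pset : PySem.Set String) (num : String) : Nat → String
  | 0 => ""
  | k + 1 =>
      let cand := PySem.Str.slice num none (some ((k + 1 : Nat) : Int))
      if PySem.Set.contains pset cand then cand else match3Best pset num k

def match3_alt (prefixes : List String) (nums : List String) : List String :=
  let pset := PySem.Set.ofList prefixes
  nums.map (fun num => match3Best pset num num.toList.length)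

-- ===== PRECONDITION & SPEC =====
def Spec_match3 (prefixes : List String) (nums : List String) (out : List String) : Prop := out = match3_alt prefixes nums
instance (prefixes : List String) (nums : List String) (out : List String) : Decidable (Spec_match3 prefixes nums out) := by unfold Spec_match3; infer_instance

-- ===== CLAIM (what is proved, stated in full; the proofs are below) =====
def Claim_equal_match3 : Prop := ∀ (prefixes : List String) (nums : List String), Dom_match3 prefixes nums → Spec_match3 prefixes nums (match3 prefixes nums)

-- ===== LEMMAS AND PROOFS =====

-- abstract single-num accumulator for A's inner loop
def optStep (num : String) (o : Option String) (p : String) : Option String :=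
  if PySem.Str.startswith num p then
    match o with
    | none => some p
    | some c => if PySem.Str.len c < PySem.Str.len p then some p else some c
  else o

def stOf (m : List String) : Option String → Bool × List String
  | none => (false, m)
  | some c => (true, m ++ [c])

theorem innerStep_eq (num : String) (m : List String) (o : Option String) (p : String) :
    match3InnerStep num (stOf m o) p = stOf m (optStep num o p) := by
  cases o with
  | none =>
      by_cases h : PySem.Str.startswith num p = true
      · simp [match3InnerStep, optStep, stOf, h, -PySem.Str.startswith_eq, -PySem.Str.len_eq]
      · simp [match3InnerStep, optStep, stOf, h, -PySem.Str.startswith_eq, -PySem.Str.len_eq]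
  | some c =>
      by_cases h : PySem.Str.startswith num p = true
      · by_cases h2 : PySem.Str.len ((PySem.List.pyGet? (m ++ [c]) (-1)).getD "") < PySem.Str.len p
        · have h2' : PySem.Str.len c < PySem.Str.len p := by
            simpa [PySem.List.pyGet?_neg_one] using h2
          simp [match3InnerStep, optStep, stOf, h, h2', -PySem.Str.startswith_eq, -PySem.Str.len_eq]
        · have h2' : ¬ PySem.Str.len c < PySem.Str.len p := by
            simpa [PySem.List.pyGet?_neg_one] using h2
          simp [match3InnerStep, optStep, stOf, h, h2', -PySem.Str.startswith_eq, -PySem.Str.len_eq]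
      · simp [match3InnerStep, optStep, stOf, h, -PySem.Str.startswith_eq, -PySem.Str.len_eq]

theorem innerFold_eq (num : String) (ps : List String) :
    ∀ (o : Option String) (m : List String),
    ps.foldl (match3InnerStep num) (stOf m o) = stOf m (ps.foldl (optStep num) o) := by
  induction ps with
  | nil => intro o m; rfl
  | cons p ps ih =>
      intro o m
      simp only [List.foldl_cons, innerStep_eq num m o p]
      exact ih _ m

-- A's per-num result
def resA (prefixes : List String) (num : String) : String :=
  (prefixes.foldl (optStep num) none).getD ""

theorem match3_eq_map (prefixes nums : List String) :
    match3 prefixes nums = nums.map (resA prefixes) := by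
  suffices h : ∀ m, nums.foldl
      (fun matching num =>
        let st := prefixes.foldl (match3InnerStep num) (false, matching)
        if st.1 = false then st.2 ++ [""] else st.2) m = m ++ nums.map (resA prefixes) by
    simpa [match3] using h []
  induction nums with
  | nil => intro m; simp
  | cons num nums ih =>
      intro m
      have h1 : prefixes.foldl (match3InnerStep num) (false, m)
          = stOf m (prefixes.foldl (optStep num) none) := innerFold_eq num prefixes none m
      simp only [List.foldl_cons, List.map_cons, h1]
      cases hfo : prefixes.foldl (optStep num) none with
      | none => simp [stOf, resA, hfo, ih]
      | some c => simp [stOf, resA, hfo, ih]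

theorem optStep_pos_none (num : String) (p : String)
    (h : PySem.Str.startswith num p = true) : optStep num none p = some p := by
  simp [optStep, h, -PySem.Str.startswith_eq]

theorem optStep_pos_some (num : String) (d p : String)
    (h : PySem.Str.startswith num p = true) :
    optStep num (some d) p
      = if PySem.Str.len d < PySem.Str.len p then some p else some d := by
  simp [optStep, h, -PySem.Str.startswith_eq, -PySem.Str.len_eq]

theorem optStep_neg (num : String) (o : Option String) (p : String)
    (h : PySem.Str.startswith num p = false) : optStep num o p = o := by
  simp [optStep, h, -PySem.Str.startswith_eq]

theorem optStep_none_iff (num : String) (o : Option String) (p : String) :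
    optStep num o p = none ↔ o = none ∧ PySem.Str.startswith num p = false := by
  cases h : PySem.Str.startswith num p with
  | false => simp [optStep_neg num o p h]
  | true =>
      cases o with
      | none => simp [optStep_pos_none num p h]
      | some d =>
          rw [optStep_pos_some num d p h]
          constructor
          · intro he; split at he <;> cases he
          · rintro ⟨h1, _⟩; cases h1

theorem optStep_some_sw (num : String) (o : Option String) (p : String)
    (ho : ∀ d, o = some d → PySem.Str.startswith num d = true) :
    ∀ c, optStep num o p = some c → PySem.Str.startswith num c = true := by
  intro c he
  cases h : PySem.Str.startswith num p with
  | false => rw [optStep_neg num o p h] at he; exact ho c he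
  | true =>
      cases o with
      | none => rw [optStep_pos_none num p h] at he; cases he; exact h
      | some d =>
          rw [optStep_pos_some num d p h] at he
          by_cases h2 : PySem.Str.len d < PySem.Str.len p
          · rw [if_pos h2] at he; cases he; exact h
          · rw [if_neg h2] at he; exact ho c he

theorem optStep_some_src (num : String) (o : Option String) (p : String) :
    ∀ c, optStep num o p = some c → o = some c ∨ c = p := by
  intro c he
  cases h : PySem.Str.startswith num p with
  | false => rw [optStep_neg num o p h] at he; exact Or.inl (by rw [he])
  | true =>
      cases o with
      | none => rw [optStep_pos_none num p h] at he; cases he; exact Or.inr rfl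
      | some d =>
          rw [optStep_pos_some num d p h] at he
          by_cases h2 : PySem.Str.len d < PySem.Str.len p
          · rw [if_pos h2] at he; cases he; exact Or.inr rfl
          · rw [if_neg h2] at he; cases he; exact Or.inl rfl

theorem optStep_len_p (num : String) (o : Option String) (p : String)
    (hp : PySem.Str.startswith num p = true) :
    ∀ c, optStep num o p = some c → PySem.Str.len p ≤ PySem.Str.len c := by
  intro c he
  cases o with
  | none => rw [optStep_pos_none num p hp] at he; cases he; exact le_refl _
  | some d =>
      rw [optStep_pos_some num d p hp] at he
      by_cases h2 : PySem.Str.len d < PySem.Str.len p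
      · rw [if_pos h2] at he; cases he; exact le_refl _
      · rw [if_neg h2] at he; cases he; omega

theorem optStep_mono (num : String) (o : Option String) (p : String) :
    ∀ d c, o = some d → optStep num o p = some c → PySem.Str.len d ≤ PySem.Str.len c := by
  intro d c hd he
  subst hd
  cases h : PySem.Str.startswith num p with
  | false => rw [optStep_neg num (some d) p h] at he; cases he; exact le_refl _
  | true =>
      rw [optStep_pos_some num d p h] at he
      by_cases h2 : PySem.Str.len d < PySem.Str.len p
      · rw [if_pos h2] at he; cases he; omega
      · rw [if_neg h2] at he; cases he; exact le_refl _

-- characterization of A's inner fold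
theorem optFold_char (num : String) (ps : List String) :
    ∀ (o : Option String), (∀ c, o = some c → PySem.Str.startswith num c = true) →
    (match ps.foldl (optStep num) o with
     | none => o = none ∧ ∀ p ∈ ps, PySem.Str.startswith num p = false
     | some c => PySem.Str.startswith num c = true ∧ (c ∈ ps ∨ o = some c)
        ∧ (∀ p ∈ ps, PySem.Str.startswith num p = true → PySem.Str.len p ≤ PySem.Str.len c)
        ∧ (∀ d, o = some d → PySem.Str.len d ≤ PySem.Str.len c)) := by
  induction ps with
  | nil =>
      intro o ho
      cases o with
      | none => simp
      | some c =>
          refine ⟨ho c rfl, Or.inr rfl, by simp, fun d hd => ?_⟩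
          cases hd; exact le_refl _
  | cons x xs ih =>
      intro o ho
      have ho' : ∀ c, optStep num o x = some c → PySem.Str.startswith num c = true :=
        optStep_some_sw num o x (fun d hd => ho d hd)
      have IH := ih (optStep num o x) ho'
      simp only [List.foldl_cons]
      cases hres : xs.foldl (optStep num) (optStep num o x) with
      | none =>
          rw [hres] at IH
          obtain ⟨h1, h2⟩ := IH
          obtain ⟨h3, h4⟩ := (optStep_none_iff num o x).mp h1
          exact ⟨h3, by
            intro q hq
            rcases List.mem_cons.mp hq with h | h
            · subst h; exact h4
            · exact h2 q h⟩
      | some c =>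
          rw [hres] at IH
          obtain ⟨hc, hcmem, hmax, hmono'⟩ := IH
          have hne : ∀ e, optStep num o x = some e →
              (∀ d, o = some d → PySem.Str.len d ≤ PySem.Str.len c) := by
            intro e he d hd
            exact le_trans (optStep_mono num o x d e hd he) (hmono' e he)
          refine ⟨hc, ?_, ?_, ?_⟩
          · rcases hcmem with h | h
            · exact Or.inl (List.mem_cons_of_mem _ h)
            · rcases optStep_some_src num o _ c h with h' | h'
              · exact Or.inr h'
              · exact Or.inl (h' ▸ List.mem_cons_self)
          · intro q hq hsq
            rcases List.mem_cons.mp hq with h | h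
            · subst h
              cases he : optStep num o q with
              | none =>
                  exact absurd ((optStep_none_iff num o q).mp he).2
                    (by simp [hsq, -PySem.Str.startswith_eq])
              | some e =>
                  exact le_trans (optStep_len_p num o q hsq e he) (hmono' e he)
            · exact hmax q h hsq
          · intro d hd
            cases he : optStep num o x with
            | none =>
                obtain ⟨h3, _⟩ := (optStep_none_iff num o x).mp he
                rw [h3] at hd; cases hd
            | some e => exact hne e he d hd

-- B's scan characterization: candidate strings
def tk (num : String) (k : Nat) : String := PySem.Str.slice num none (some (k : Int))

theorem toList_tk (num : String) (k : Nat) : (tk num k).toList = num.toList.take k := by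
  simp [tk, PySem.Str.toList_slice, PySem.List.slice_to_natCast]

theorem best_char (pset : PySem.Set String) (num : String) :
    ∀ k, (match3Best pset num k = "" ∧ ∀ j, 1 ≤ j → j ≤ k → PySem.Set.contains pset (tk num j) = false)
      ∨ (∃ j, 1 ≤ j ∧ j ≤ k ∧ match3Best pset num k = tk num j ∧ PySem.Set.contains pset (tk num j) = true
          ∧ ∀ i, j < i → i ≤ k → PySem.Set.contains pset (tk num i) = false) := by
  intro k
  induction k with
  | zero => left; exact ⟨rfl, fun j h1 h2 => absurd (le_trans h1 h2) (by omega)⟩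
  | succ k ih =>
      have hstep : match3Best pset num (k + 1)
          = if PySem.Set.contains pset (tk num (k + 1)) then tk num (k + 1)
            else match3Best pset num k := rfl
      by_cases hc : PySem.Set.contains pset (tk num (k + 1)) = true
      · right
        exact ⟨k + 1, by omega, le_refl _, by rw [hstep, if_pos hc], hc, fun i h1 h2 => by omega⟩
      · rw [hstep, if_neg hc] at *
        rcases ih with ⟨h1, h2⟩ | ⟨j, hj1, hj2, hj3, hj4, hj5⟩
        · left
          refine ⟨hstep ▸ h1, fun j a1 a2 => ?_⟩
          rcases Nat.lt_or_ge j (k + 1) with h | h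
          · exact h2 j a1 (by omega)
          · have : j = k + 1 := by omega
            subst this; simpa using hc
        · right
          refine ⟨j, hj1, by omega, hstep ▸ hj3, hj4, fun i a1 a2 => ?_⟩
          rcases Nat.lt_or_ge i (k + 1) with h | h
          · exact hj5 i a1 (by omega)
          · have : i = k + 1 := by omega
            subst this; simpa using hc

-- membership in the prefix set
theorem contains_iff (prefixes : List String) (s : String) :
    PySem.Set.contains (PySem.Set.ofList prefixes) s = true ↔ s ∈ prefixes := by
  simp [PySem.Set.mem_ofList]

-- matching prefixes are takes of num
theorem startswith_iff_str (num p : String) :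
    PySem.Str.startswith num p = true ↔ p.toList <+: num.toList := by
  simp [PySem.Chars.startswith_iff]

theorem resA_eq_best (prefixes : List String) (num : String) :
    resA prefixes num = match3Best (PySem.Set.ofList prefixes) num num.toList.length := by
  have hchar := optFold_char num prefixes none (by intro c hc; cases hc)
  have hbest := best_char (PySem.Set.ofList prefixes) num num.toList.length
  have htk_sw : ∀ j, j ≤ num.toList.length → PySem.Str.startswith num (tk num j) = true := by
    intro j _
    rw [startswith_iff_str, toList_tk]
    exact List.take_prefix j num.toList
  have htk_len : ∀ j, j ≤ num.toList.length → (tk num j).toList.length = j := by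
    intro j hj; rw [toList_tk, List.length_take, Nat.min_eq_left hj]
  cases hfo : prefixes.foldl (optStep num) none with
  | none =>
      rw [hfo] at hchar
      obtain ⟨-, hnone⟩ := hchar
      rcases hbest with ⟨hb, -⟩ | ⟨j, hj1, hj2, hb, hmem, -⟩
      · unfold resA; rw [hfo]; simpa using hb.symm
      · exfalso
        have hm : tk num j ∈ prefixes := (contains_iff prefixes (tk num j)).mp hmem
        have h0 := hnone _ hm
        rw [htk_sw j hj2] at h0; cases h0
  | some c =>
      rw [hfo] at hchar
      obtain ⟨hc_sw, hc_mem, hc_max, -⟩ := hchar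
      have hc_mem' : c ∈ prefixes := by
        rcases hc_mem with h | h
        · exact h
        · cases h
      have hc_pref : c.toList <+: num.toList := (startswith_iff_str num c).mp hc_sw
      have hc_le : c.toList.length ≤ num.toList.length := hc_pref.length_le
      have hc_tk : c = tk num c.toList.length := by
        rw [← String.toList_inj, toList_tk]
        exact List.prefix_iff_eq_take.mp hc_pref
      have hcont : PySem.Set.contains (PySem.Set.ofList prefixes) (tk num c.toList.length) = true :=
        (contains_iff prefixes (tk num c.toList.length)).mpr (hc_tk ▸ hc_mem')
      rcases hbest with ⟨hb, hnone⟩ | ⟨j, hj1, hj2, hb, hmem, hmaxB⟩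
      · by_cases hz : c.toList.length = 0
        · have hce : c = "" := by
            rw [← String.toList_inj]
            simp [List.length_eq_zero_iff.mp hz]
          unfold resA; rw [hfo]; rw [hce]; simpa using hb.symm
        · exfalso
          have h0 := hnone c.toList.length (by omega) hc_le
          rw [hcont] at h0; cases h0
      · have htkj_mem : tk num j ∈ prefixes := (contains_iff prefixes (tk num j)).mp hmem
        have h1 : PySem.Str.len (tk num j) ≤ PySem.Str.len c :=
          hc_max _ htkj_mem (htk_sw j hj2)
        have hlenj : (tk num j).toList.length = j := htk_len j hj2
        have hj_le : j ≤ c.toList.length := by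
          rw [PySem.Str.len_eq, PySem.Str.len_eq, hlenj] at h1
          exact_mod_cast h1
        have hle_j : c.toList.length ≤ j := by
          by_contra hlt
          have h0 := hmaxB c.toList.length (by omega) hc_le
          rw [hcont] at h0; cases h0
        have hjc : j = c.toList.length := le_antisymm hj_le hle_j
        rw [hb, hjc, ← hc_tk]
        simp [resA, hfo]

-- ===== VERDICT (by name: the statement is the Claim_ definition above) =====
theorem match3_spec : Claim_equal_match3 := by
  intro prefixes nums _
  unfold Spec_match3
  simp only [match3_eq_map, match3_alt]
  exact List.map_congr_left (fun num _ => resA_eq_best prefixes num)
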